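-- pv_equiv track=rewrite | github.com/laichunpongben/CodeJam | 2016/qualification_round/coin_jam.py | is_coin_jam
-- ===== SOURCE A (Python) =====
-- def is_coin_jam(coin):
--     if len(coin) < 2:
--         return False
--     if not coin[0].startswith('1'):
--         return False
--     if not coin[-1].startswith('1'):
--         return False
--
--     for base in range(2, 11):
--         base10_int = int(coin, base)
--         threshold = 1000
--         if has_no_divisor_below(base10_int, threshold):
--             return False
--
--     return True
--
-- def has_no_divisor_below(n, threshold):
--     """Returns True if n is prime."""
--     if n == 2:
--         return True
--     if n == 3:
--         return True
--     if n % 2 == 0: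
--         return False
--     if n % 3 == 0:
--         return False
--
--     i = 5
--     w = 2
--
--     while i * i <= n:
--         if i > threshold:
--             break
--
--         if n % i == 0:
--             return False
--
--         i += w
--         w = 6 - w
--
--     return True
-- ===== SOURCE B (Python) =====
-- # B: same three guards, but the small-divisor hunt becomes a single gcd with the
-- # precomputed primorial of the primes below 1000 plus a prime-table membership
-- # test; base values are computed by an explicit Horner fold.
--
-- _PRIMES = [2, 3, 5, 7, 11, 13, 17, 19, 23, 29, 31, 37, 41, 43, 47, 53, 59, 61, 67, 71, 73, 79, 83, 89, 97, 101, 103, 107, 109, 113, 127, 131, 137, 139, 149, 151, 157, 163, 167, 173, 179, 181, 191, 193, 197, 199, 211, 223, 227, 229, 233, 239, 241, 251, 257, 263, 269, 271, 277, 281, 283, 293, 307, 311, 313, 317, 331, 337, 347, 349, 353, 359, 367, 373, 379, 383, 389, 397, 401, 409, 419, 421, 431, 433, 439, 443, 449, 457, 461, 463, 467, 479, 487, 491, 499, 503, 509, 521, 523, 541, 547, 557, 563, 569, 571, 577, 587, 593, 599, 601, 607, 613, 617, 619, 631, 641, 643, 647, 653, 659, 661, 673, 677, 683, 691, 701, 709,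 719, 727, 733, 739, 743, 751, 757, 761, 769, 773, 787, 797, 809, 811, 821, 823, 827, 829, 839, 853, 857, 859, 863, 877, 881, 883, 887, 907, 911, 919, 929, 937, 941, 947, 953, 967, 971, 977, 983, 991, 997]
--
-- _PRIMORIAL = 1
-- for _p in _PRIMES:
--     _PRIMORIAL *= _p
--
-- def _gcd(a, b):
--     while b:
--         a, b = b, a % b
--     return a
--
-- def _value(coin, base):
--     v = 0
--     for c in coin:
--         v = v * base + int(c)
--     return v
--
-- def _has_small_factor(n):
--     return _gcd(n, _PRIMORIAL) > 1 and n not in _PRIMES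
--
-- def is_coin_jam(coin):
--     if len(coin) < 2 or coin[0] != '1' or coin[-1] != '1':
--         return False
--     return all(_has_small_factor(_value(coin, b)) for b in range(2, 11))
-- ===== Notes on version B (the rewrite author's own statement) =====
-- stated objective: alternative
-- what changed: The 6k±1 trial-division while-loop (with its n==2/n==3/%2/%3 special cases) is replaced by a single Euclidean gcd of n with the precomputed primorial of all primes below 1000 combined with a prime-table membership test (a small factor exists iff gcd(n, primorial) > 1 and n is not itself one of those primes); base conversion is an explicit Horner fold instead of int(coin, base).
-- outside the precondition, e.g. on is_coin_jam('1_1'): A returns False, B raises ValueError; on is_coin_jam('121'): A raises ValueError, B returns True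
import Mathlib
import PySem

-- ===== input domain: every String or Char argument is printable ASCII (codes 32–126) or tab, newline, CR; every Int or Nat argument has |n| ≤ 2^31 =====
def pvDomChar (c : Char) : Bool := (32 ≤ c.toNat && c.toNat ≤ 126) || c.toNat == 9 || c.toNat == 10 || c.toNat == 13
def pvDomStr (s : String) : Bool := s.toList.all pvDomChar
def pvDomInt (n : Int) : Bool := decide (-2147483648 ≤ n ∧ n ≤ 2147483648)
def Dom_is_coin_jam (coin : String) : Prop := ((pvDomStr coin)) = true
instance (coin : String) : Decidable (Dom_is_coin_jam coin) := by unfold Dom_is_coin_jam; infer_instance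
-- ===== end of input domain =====

-- B keeps A's guards but replaces the inline 6k±1 trial-division loop by a single
-- Euclidean gcd with the precomputed primorial of the primes below 1000 plus a
-- prime-table membership test (objective: alternative).

-- ===== PORT A =====

-- port of int(coin, base): Horner fold over the digits; exact for numerals whose
-- digits are '0'/'1' (Pre_ restricts to these; other coins raise or are '_'-grouped)
def pyIntBase (cs : List Char) (base : Int) : Int :=
  cs.foldl (fun v c => v * base + ((c.toNat : Int) - 48)) 0

-- the while-loop of has_no_divisor_below; fuel threshold.toNat + 2 is enough since
-- i starts at 5, grows by ≥ 2 each step, and the loop breaks once i > threshold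
def trialLoop (fuel : Nat) (n i w threshold : Int) : Bool :=
  match fuel with
  | 0 => true
  | f + 1 =>
    if i * i ≤ n then
      if i > threshold then true
      else if n % i == 0 then false
      else trialLoop f n (i + w) (6 - w) threshold
    else true

def has_no_divisor_below (n threshold : Int) : Bool :=
  if n == 2 then true
  else if n == 3 then true
  else if n % 2 == 0 then false
  else if n % 3 == 0 then false
  else trialLoop (threshold.toNat + 2) n 5 2 threshold

def is_coin_jam (coin : String) : Bool :=
  if coin.toList.length < 2 then false
  else if !(coin.toList[0]?.getD ' ' == '1') then false      -- coin[0], safe: length ≥ 2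
  else if !(coin.toList.getLast? == some '1') then false     -- coin[-1]
  else (PySem.List.pyRange 2 11 1).all
    (fun base => !(has_no_divisor_below (pyIntBase coin.toList base) 1000))

-- ===== PORT B =====

-- the _PRIMES table literal of Source B
def PRIMES : List Int := [2, 3, 5, 7, 11, 13, 17, 19, 23, 29, 31, 37, 41, 43, 47, 53, 59, 61, 67, 71, 73, 79, 83, 89, 97, 101, 103, 107, 109, 113, 127, 131, 137, 139, 149, 151, 157, 163, 167, 173, 179, 181, 191, 193, 197, 199, 211, 223, 227, 229, 233, 239, 241, 251, 257, 263, 269, 271, 277, 281, 283, 293, 307, 311, 313, 317, 331, 337, 347, 349, 353, 359, 367, 373, 379, 383, 389, 397, 401, 409, 419, 421, 431, 433, 439, 443, 449, 457, 461, 463, 467, 479, 487, 491, 499, 503, 509, 521, 523, 541, 547, 557, 563, 569, 571, 577, 587, 593, 599, 601, 607, 613, 617, 619, 631, 641, 643, 647, 653, 659, 661, 673, 677, 683, 691, 701, 709, 719, 727, 733, 739, 743, 751, 757, 761, 769, 773, 787, 797, 809, 811, 821, 823, 827, 829, 839, 853, 857, 859, 863, 877, 881, 883, 887, 907, 911, 919,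 929, 937, 941, 947, 953, 967, 971, 977, 983, 991, 997]

-- the module-level loop building _PRIMORIAL
def PRIMORIAL : Int := PRIMES.foldl (fun acc p => acc * p) 1

-- port of _gcd's while-loop ('while b: a, b = b, a % b'); Python '%' = PySem.Int.mod
def gcdLoop (a b : Int) : Int :=
  if h : b = 0 then a else gcdLoop b (PySem.Int.mod a b)
termination_by b.natAbs
decreasing_by
  rcases lt_or_gt_of_ne h with hb | hb
  · have h1 := (PySem.Int.mod_neg_bounds a hb).1
    have h2 := (PySem.Int.mod_neg_bounds a hb).2
    omega
  · have h1 := PySem.Int.mod_nonneg a hb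
    have h2 := PySem.Int.mod_lt a hb
    omega

def hasSmallFactorB (n : Int) : Bool :=
  decide (1 < gcdLoop n PRIMORIAL) && !(PRIMES.contains n)

-- port of _value: Horner fold with int(c); exact for digit characters (Pre_: '0'/'1')
def valB (base : Int) (cs : List Char) : Int :=
  cs.foldl (fun v c => v * base + ((c.toNat : Int) - 48)) 0

def is_coin_jam_alt (coin : String) : Bool :=
  if decide (coin.toList.length < 2) || !(coin.toList[0]?.getD ' ' == '1')
      || !(coin.toList.getLast? == some '1') then false
  else (PySem.List.pyRange 2 11 1).all (fun base => hasSmallFactorB (valB base coin.toList))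

-- ===== PRECONDITION & SPEC =====
-- Pre_ excludes coins that pass the three guards but contain a non-binary-digit
-- character: int(coin, base) raises ValueError on almost all of them (base 2 rejects
-- any larger digit), and the few that survive (the underscore-grouped cite in
-- claim.json) only return via Python's accidental digit-grouping, on which B's
-- per-character int(c) itself raises.
def Pre_is_coin_jam (coin : String) : Prop :=
  coin.toList.length < 2 ∨ coin.toList[0]?.getD ' ' ≠ '1' ∨
    coin.toList.getLast? ≠ some '1' ∨ (coin.toList.all (fun c => c == '0' || c == '1')) = true
instance (coin : String) : Decidable (Pre_is_coin_jam coin) := by unfold Pre_is_coin_jam; infer_instance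

def pvWitness_is_coin_jam : String := "11"

def Spec_is_coin_jam (coin : String) (out : Bool) : Prop := out = is_coin_jam_alt coin
instance (coin : String) (out : Bool) : Decidable (Spec_is_coin_jam coin out) := by unfold Spec_is_coin_jam; infer_instance

-- ===== CLAIM (what is proved, stated in full; the proofs are below) =====
def Claim_equal_is_coin_jam : Prop := ∀ (coin : String), Dom_is_coin_jam coin → Pre_is_coin_jam coin → Spec_is_coin_jam coin (is_coin_jam coin)

-- ===== LEMMAS AND PROOFS =====
set_option maxRecDepth 10000
set_option maxHeartbeats 1000000

-- A's result characterised as a scan of the prime table (proof-side only)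
def tableScan (n : Int) : Bool :=
  PRIMES.any (fun p => decide (p * p ≤ n) && (n % p == 0))

-- the candidate divisors A's loop scans: 5, 7, 11, 13, …
def seqFrom : Nat → Int → Int → List Int
  | 0, _, _ => []
  | m + 1, i, w => i :: seqFrom m (i + w) (6 - w)

-- the prime table over Nat, for kernel-cheap 'decide's
def pLITn : List Nat := [2, 3, 5, 7, 11, 13, 17, 19, 23, 29, 31, 37, 41, 43, 47, 53, 59, 61, 67, 71, 73, 79, 83, 89, 97, 101, 103, 107, 109, 113, 127, 131, 137, 139, 149, 151, 157, 163, 167, 173, 179, 181, 191, 193, 197, 199, 211, 223, 227, 229, 233, 239, 241, 251, 257, 263, 269, 271, 277, 281, 283, 293, 307, 311, 313, 317, 331, 337, 347, 349, 353, 359, 367, 373, 379, 383, 389, 397, 401, 409, 419, 421, 431, 433, 439, 443, 449, 457, 461, 463, 467, 479, 487, 491, 499, 503, 509, 521, 523, 541, 547, 557, 563, 569, 571, 577, 587, 593, 599, 601, 607, 613, 617, 619, 631, 641, 643, 647, 653, 659, 661, 673, 677, 683, 691, 701, 709, 719, 727, 733, 739, 743, 751, 757, 761, 769, 773, 787, 797,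 809, 811, 821, 823, 827, 829, 839, 853, 857, 859, 863, 877, 881, 883, 887, 907, 911, 919, 929, 937, 941, 947, 953, 967, 971, 977, 983, 991, 997]

lemma primes_map : PRIMES = pLITn.map (fun (q : Nat) => (q : Int)) := by decide
lemma pLITn_bounds : ∀ p ∈ pLITn, 2 ≤ p ∧ p ≤ 1000 := by decide
lemma pLITn_mod6 : ∀ p ∈ pLITn, p = 2 ∨ p = 3 ∨ (p % 6 = 5 ∨ p % 6 = 1) := by decide
lemma seq_factor_nat : ∀ c : Nat, c < 1001 → (c % 6 = 5 ∨ c % 6 = 1) → 5 ≤ c →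
    ∃ p ∈ pLITn, c % p = 0 ∧ p ≤ c := by decide
lemma pLITn_nodiv : ∀ p ∈ pLITn, ∀ d < 32, 2 ≤ d → d * d ≤ p → p % d ≠ 0 := by decide
lemma mem_of_nodiv : ∀ q < 1001, 2 ≤ q → (∀ d ∈ pLITn, d * d ≤ q → q % d ≠ 0) → q ∈ pLITn := by decide
lemma primorial_eq : PRIMORIAL = ((pLITn.prod : Nat) : Int) := by decide

lemma pLITn_prime : ∀ p ∈ pLITn, Nat.Prime p := by
  intro p hp
  have hb := pLITn_bounds p hp
  rw [Nat.prime_def_le_sqrt]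
  refine ⟨hb.1, ?_⟩
  intro m hm2 hmsq hdvd
  have hmm : m * m ≤ p := Nat.le_sqrt.mp hmsq
  have hm32 : m < 32 := by nlinarith [hb.2]
  exact pLITn_nodiv p hp m hm32 hm2 hmm (Nat.dvd_iff_mod_eq_zero.mp hdvd)

-- every prime ≤ 1000 is in the table
lemma prime_le_1000_mem : ∀ q, q ≤ 1000 → Nat.Prime q → q ∈ pLITn := by
  intro q hq hqp
  refine mem_of_nodiv q (by omega) hqp.two_le ?_
  intro d hd hdd hmod
  have hddvd : d ∣ q := Nat.dvd_of_mod_eq_zero hmod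
  rcases hqp.eq_one_or_self_of_dvd d hddvd with h1 | h2
  · exact absurd h1 (by have := (pLITn_bounds d hd).1; omega)
  · subst h2; nlinarith [(pLITn_bounds d hd).1]

lemma primes_bounds : ∀ p ∈ PRIMES, (2 : Int) ≤ p ∧ p ≤ 1000 := by
  intro p hp
  have hp' : p ∈ pLITn.map (fun (q : Nat) => (q : Int)) := primes_map ▸ hp
  rw [List.mem_map] at hp'
  obtain ⟨q, hq, rfl⟩ := hp'
  have h := pLITn_bounds q hq
  exact ⟨by exact_mod_cast h.1, by exact_mod_cast h.2⟩

lemma seqFrom_ge (m : Nat) : ∀ (i w c : Int), (w = 2 ∨ w = 4) → c ∈ seqFrom m i w → i ≤ c := by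
  induction m with
  | zero => intro i w c _ hc; simp [seqFrom] at hc
  | succ m ih =>
    intro i w c hw hc
    simp only [seqFrom, List.mem_cons] at hc
    rcases hc with rfl | hc
    · exact le_refl c
    · have h6 : (6 - w = 2 ∨ 6 - w = 4) := by omega
      have := ih (i + w) (6 - w) c h6 hc
      omega

lemma seqFrom_pair (m : Nat) : ∀ (k c : Int), c ∈ seqFrom (2 * m) (6 * k + 5) 2 ↔
    ∃ j : Int, k ≤ j ∧ j < k + m ∧ (c = 6 * j + 5 ∨ c = 6 * j + 7) := by
  induction m with
  | zero =>
    intro k c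
    constructor
    · intro hc; simp [seqFrom] at hc
    · rintro ⟨j, h1, h2, _⟩; omega
  | succ m ih =>
    intro k c
    have hunf : seqFrom (2 * (m + 1)) (6 * k + 5) 2 =
        (6 * k + 5) :: (6 * k + 7) :: seqFrom (2 * m) (6 * (k + 1) + 5) 2 := by
      have e1 : (6 : Int) - 2 = 4 := by norm_num
      have e2 : (6 : Int) - 4 = 2 := by norm_num
      have e3 : 6 * k + 5 + 2 = 6 * k + 7 := by ring
      have e4 : 6 * k + 7 + 4 = 6 * (k + 1) + 5 := by ring
      calc seqFrom (2 * (m + 1)) (6 * k + 5) 2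
          = seqFrom ((2 * m + 1) + 1) (6 * k + 5) 2 := by
            rw [show 2 * (m + 1) = (2 * m + 1) + 1 from by omega]
        _ = (6 * k + 5) :: seqFrom (2 * m + 1) (6 * k + 5 + 2) (6 - 2) := rfl
        _ = (6 * k + 5) :: seqFrom ((2 * m) + 1) (6 * k + 7) 4 := by rw [e1, e3]
        _ = (6 * k + 5) :: (6 * k + 7) :: seqFrom (2 * m) (6 * k + 7 + 4) (6 - 4) := rfl
        _ = (6 * k + 5) :: (6 * k + 7) :: seqFrom (2 * m) (6 * (k + 1) + 5) 2 := by rw [e2, e4]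
    rw [hunf]
    simp only [List.mem_cons, ih (k + 1) c]
    constructor
    · rintro (rfl | rfl | ⟨j, h1, h2, h3⟩)
      · exact ⟨k, by omega, by omega, by omega⟩
      · exact ⟨k, by omega, by omega, by omega⟩
      · exact ⟨j, by omega, by omega, by omega⟩
    · rintro ⟨j, h1, h2, h3⟩
      by_cases hj : j = k
      · subst hj
        rcases h3 with rfl | rfl
        · exact Or.inl rfl
        · exact Or.inr (Or.inl rfl)
      · exact Or.inr (Or.inr ⟨j, by omega, by omega, by omega⟩)

lemma mem_seq_iff (c : Int) : c ∈ seqFrom 1002 5 2 ↔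
    (5 ≤ c ∧ c ≤ 3007 ∧ (c % 6 = 5 ∨ c % 6 = 1)) := by
  have h : (1002 : Nat) = 2 * 501 := by norm_num
  have h5 : (5 : Int) = 6 * 0 + 5 := by norm_num
  rw [h, h5, seqFrom_pair]
  constructor
  · rintro ⟨j, h1, h2, h3 | h3⟩ <;> omega
  · rintro ⟨hc5, hc7, hm | hm⟩
    · exact ⟨c / 6, by omega, by omega, Or.inl (by omega)⟩
    · exact ⟨c / 6 - 1, by omega, by omega, Or.inr (by omega)⟩

lemma trialLoop_eq (m : Nat) : ∀ (n i w : Int), (w = 2 ∨ w = 4) → 5 ≤ i →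
    trialLoop m n i w 1000 =
      !((seqFrom m i w).any (fun c => decide (c ≤ 1000) && decide (c * c ≤ n) && (n % c == 0))) := by
  induction m with
  | zero => intro n i w _ _; simp [trialLoop, seqFrom]
  | succ m ih =>
    intro n i w hw hi
    have h6 : (6 - w = 2 ∨ 6 - w = 4) := by omega
    have hi' : 5 ≤ i + w := by omega
    simp only [trialLoop, seqFrom, List.any_cons]
    split_ifs with h1 h2 h3
    · -- i * i ≤ n, i > 1000 : break, and no remaining candidate is ≤ 1000
      have htail : (seqFrom m (i + w) (6 - w)).any
          (fun c => decide (c ≤ 1000) && decide (c * c ≤ n) && (n % c == 0)) = false := by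
        rw [List.any_eq_false]
        intro c hc
        have hge := seqFrom_ge m (i + w) (6 - w) c h6 hc
        have : ¬ (c ≤ 1000) := by omega
        simp [this]
      have hhead : ¬ (i ≤ 1000) := by omega
      simp [htail, hhead]
    · -- divisor found at i
      have : (decide (i ≤ 1000) && decide (i * i ≤ n) && (n % i == 0)) = true := by
        simp_all
      simp [this]
    · -- i is no divisor, continue
      have hhead : (decide (i ≤ 1000) && decide (i * i ≤ n) && (n % i == 0)) = false := by
        simp_all
      rw [hhead, Bool.false_or]
      exact ih n (i + w) (6 - w) h6 hi'
    · -- i * i > n : loop ends, no later candidate satisfies c * c ≤ n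
      have hall : ∀ c ∈ seqFrom (m + 1) i w,
          (decide (c ≤ 1000) && decide (c * c ≤ n) && (n % c == 0)) = false := by
        intro c hc
        have hge : i ≤ c := seqFrom_ge (m + 1) i w c hw hc
        have hcc : i * i ≤ c * c := by nlinarith
        have : ¬ (c * c ≤ n) := by omega
        simp [this]
      have h0 := hall i (by simp [seqFrom])
      have htail : (seqFrom m (i + w) (6 - w)).any
          (fun c => decide (c ≤ 1000) && decide (c * c ≤ n) && (n % c == 0)) = false := by
        rw [List.any_eq_false]
        intro c hc
        have := hall c (by simp [seqFrom, hc])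
        simp [this]
      simp [h0, htail]

lemma hnd_eq (n : Int) (hn : 2 ≤ n) :
    has_no_divisor_below n 1000 = !(tableScan n) := by
  unfold has_no_divisor_below tableScan
  split_ifs with h2 h3 he ht
  · -- n = 2
    have h2' : n = 2 := by simpa using h2
    have hfalse : PRIMES.any (fun p => decide (p * p ≤ n) && (n % p == 0)) = false := by
      rw [List.any_eq_false]
      intro p hp
      have hb := primes_bounds p hp
      have : ¬ (p * p ≤ n) := by nlinarith
      simp [this]
    simp [hfalse]
  · -- n = 3
    have h3' : n = 3 := by simpa using h3
    have hfalse : PRIMES.any (fun p => decide (p * p ≤ n) && (n % p == 0)) = false := by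
      rw [List.any_eq_false]
      intro p hp
      have hb := primes_bounds p hp
      have : ¬ (p * p ≤ n) := by nlinarith
      simp [this]
    simp [hfalse]
  · -- n % 2 == 0, n ∉ {2, 3}
    have h2' : n ≠ 2 := by simpa using h2
    have he' : n % 2 = 0 := by simpa using he
    have htrue : PRIMES.any (fun p => decide (p * p ≤ n) && (n % p == 0)) = true := by
      rw [List.any_eq_true]
      refine ⟨2, ?_, ?_⟩
      · decide
      · simp [he']; omega
    simp [htrue]
  · -- n % 3 == 0, n % 2 ≠ 0
    have h3' : n ≠ 3 := by simpa using h3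
    have he' : ¬ (n % 2 = 0) := by simpa using he
    have ht' : n % 3 = 0 := by simpa using ht
    have htrue : PRIMES.any (fun p => decide (p * p ≤ n) && (n % p == 0)) = true := by
      rw [List.any_eq_true]
      refine ⟨3, ?_, ?_⟩
      · decide
      · simp [ht']; omega
    simp [htrue]
  · -- the trial loop against the prime-table scan
    have he' : ¬ (n % 2 = 0) := by simpa using he
    have ht' : ¬ (n % 3 = 0) := by simpa using ht
    have hfuel : ((1000 : Int).toNat + 2) = 1002 := rfl
    rw [hfuel, trialLoop_eq 1002 n 5 2 (Or.inl rfl) (le_refl 5)]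
    have key : (seqFrom 1002 5 2).any (fun c => decide (c ≤ 1000) && decide (c * c ≤ n) && (n % c == 0)) =
        PRIMES.any (fun p => decide (p * p ≤ n) && (n % p == 0)) := by
      rw [Bool.eq_iff_iff, List.any_eq_true, List.any_eq_true]
      constructor
      · rintro ⟨c, hc, hfc⟩
        simp only [Bool.and_eq_true, decide_eq_true_eq, beq_iff_eq] at hfc
        obtain ⟨⟨hc1000, hccn⟩, hmod⟩ := hfc
        obtain ⟨hc5, -, hcm6⟩ := (mem_seq_iff c).mp hc
        have hcast : c = ((c.toNat : Int)) := by omega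
        obtain ⟨p, hp, hpdvd, hple⟩ := seq_factor_nat c.toNat (by omega) (by omega) (by omega)
        have hpi : (p : Int) ∈ PRIMES := by
          rw [primes_map]; exact List.mem_map_of_mem (f := fun (q : Nat) => (q : Int)) hp
        have hpb := pLITn_bounds p hp
        have hdvd1 : (p : Int) ∣ c := by
          rw [hcast]
          exact_mod_cast Int.natCast_dvd_natCast.mpr (Nat.dvd_of_mod_eq_zero hpdvd)
        have hdvd2 : c ∣ n := Int.dvd_of_emod_eq_zero hmod
        have hdvdn : (p : Int) ∣ n := dvd_trans hdvd1 hdvd2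
        refine ⟨(p : Int), hpi, ?_⟩
        have hmodp : n % (p : Int) = 0 := Int.emod_eq_zero_of_dvd hdvdn
        have hplec : (p : Int) ≤ c := by omega
        have hppn : (p : Int) * (p : Int) ≤ n := by nlinarith [Int.natCast_nonneg p]
        simp [hmodp, hppn]
      · rintro ⟨p, hp, hfp⟩
        simp only [Bool.and_eq_true, decide_eq_true_eq, beq_iff_eq] at hfp
        obtain ⟨hppn, hmod⟩ := hfp
        have hp' : p ∈ pLITn.map (fun (q : Nat) => (q : Int)) := primes_map ▸ hp
        rw [List.mem_map] at hp'
        obtain ⟨q, hq, rfl⟩ := hp'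
        have hqb := pLITn_bounds q hq
        rcases pLITn_mod6 q hq with rfl | rfl | hm6
        · exact absurd (by exact_mod_cast hmod) he'
        · exact absurd (by exact_mod_cast hmod) ht'
        · have hq5 : 5 ≤ q := by omega
          have hmem : ((q : Int)) ∈ seqFrom 1002 5 2 := by
            rw [mem_seq_iff]
            refine ⟨by exact_mod_cast hq5, by omega, ?_⟩
            omega
          refine ⟨(q : Int), hmem, ?_⟩
          have : ((q : Int)) ≤ 1000 := by exact_mod_cast hqb.2
          simp [this, hppn, hmod]
    rw [key]

-- ===== the gcd/primorial side =====

lemma gcdLoop_eq_gcd : ∀ (k : Nat) (a b : Int), b.natAbs ≤ k → 0 ≤ a → 0 ≤ b →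
    gcdLoop a b = ((Int.gcd a b : Nat) : Int) := by
  intro k
  induction k with
  | zero =>
    intro a b hk ha hb
    have hb0 : b = 0 := by omega
    subst hb0
    rw [gcdLoop]
    simp [Int.gcd, Int.natAbs_of_nonneg ha]
  | succ k ih =>
    intro a b hk ha hb
    by_cases h : b = 0
    · subst h
      rw [gcdLoop]
      simp [Int.gcd, Int.natAbs_of_nonneg ha]
    · have hbpos : 0 < b := lt_of_le_of_ne hb (Ne.symm h)
      rw [gcdLoop]
      simp only [h, dite_false]
      rw [PySem.Int.mod_eq_emod_of_pos hbpos]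
      have h1 : 0 ≤ a % b := Int.emod_nonneg a (ne_of_gt hbpos)
      have h2 : a % b < b := Int.emod_lt_of_pos a hbpos
      rw [ih b (a % b) (by omega) hb h1]
      congr 1
      -- Nat.gcd b.natAbs (a % b).natAbs = Nat.gcd a.natAbs b.natAbs
      have hA : a = ((a.natAbs : Nat) : Int) := by omega
      have hB : b = ((b.natAbs : Nat) : Int) := by omega
      have hmodcast : (a % b).natAbs = a.natAbs % b.natAbs :=
        Int.natAbs_emod_of_nonneg ha b
      show Int.gcd b (a % b) = Int.gcd a b
      unfold Int.gcd
      rw [hmodcast, Nat.gcd_comm b.natAbs, ← Nat.gcd_rec, Nat.gcd_comm]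

lemma gcd_gt_one_iff (m : Nat) (hm : 2 ≤ m) :
    1 < Nat.gcd m pLITn.prod ↔ ∃ p ∈ pLITn, p ∣ m := by
  constructor
  · intro hg
    set g := Nat.gcd m pLITn.prod with hgdef
    have hq : (Nat.minFac g).Prime := Nat.minFac_prime (by omega)
    have hqg : Nat.minFac g ∣ g := Nat.minFac_dvd g
    have hqprod : Nat.minFac g ∣ pLITn.prod := hqg.trans (Nat.gcd_dvd_right _ _)
    have hqm : Nat.minFac g ∣ m := hqg.trans (Nat.gcd_dvd_left _ _)
    obtain ⟨a, ha, hqa⟩ := (Nat.Prime.prime hq).dvd_prod_iff.mp hqprod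
    have haprime := pLITn_prime a ha
    rcases (haprime.eq_one_or_self_of_dvd _ hqa) with h1 | h2
    · exact absurd h1 hq.one_lt.ne'
    · exact ⟨a, ha, h2 ▸ hqm⟩
  · rintro ⟨p, hp, hpm⟩
    have hpprod : p ∣ pLITn.prod := List.dvd_prod hp
    have hpg : p ∣ Nat.gcd m pLITn.prod := Nat.dvd_gcd hpm hpprod
    have hgpos : 0 < Nat.gcd m pLITn.prod := Nat.gcd_pos_of_pos_left _ (by omega)
    have hple := Nat.le_of_dvd hgpos hpg
    have := (pLITn_bounds p hp).1
    omega

lemma small_factor_char (m : Nat) (hm : 2 ≤ m) :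
    ((∃ p ∈ pLITn, p ∣ m) ∧ m ∉ pLITn) ↔ ∃ p ∈ pLITn, p * p ≤ m ∧ p ∣ m := by
  constructor
  · rintro ⟨⟨p, hp, hpm⟩, hmem⟩
    have hpprime := pLITn_prime p hp
    have hnotprime : ¬ m.Prime := by
      intro hmp
      rcases (hmp.eq_one_or_self_of_dvd _ hpm) with h1 | h2
      · exact absurd h1 hpprime.one_lt.ne'
      · exact hmem (h2 ▸ hp)
    have hq := Nat.minFac_prime (show m ≠ 1 by omega)
    have hqm : m.minFac ∣ m := Nat.minFac_dvd m
    have hqlep : m.minFac ≤ p := Nat.minFac_le_of_dvd hpprime.two_le hpm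
    have hq1000 : m.minFac ≤ 1000 := hqlep.trans (pLITn_bounds p hp).2
    have hqmem : m.minFac ∈ pLITn := prime_le_1000_mem _ (by omega) hq
    refine ⟨m.minFac, hqmem, ?_, hqm⟩
    have hsq := Nat.minFac_sq_le_self (show 0 < m by omega) hnotprime
    nlinarith [hsq, pow_two (m.minFac)]
  · rintro ⟨p, hp, hpp, hpm⟩
    refine ⟨⟨p, hp, hpm⟩, ?_⟩
    intro hmem
    have hmprime := pLITn_prime m hmem
    rcases (hmprime.eq_one_or_self_of_dvd _ hpm) with h1 | h2
    · exact absurd h1 (pLITn_prime p hp).one_lt.ne'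
    · subst h2
      nlinarith [(pLITn_bounds p hp).1]

lemma contains_iff (n : Int) (hn : 0 ≤ n) :
    PRIMES.contains n = true ↔ n.toNat ∈ pLITn := by
  rw [List.contains_iff_mem, primes_map, List.mem_map]
  constructor
  · rintro ⟨q, hq, rfl⟩
    simpa using hq
  · intro h
    exact ⟨n.toNat, h, by omega⟩

lemma primorial_nonneg : 0 ≤ PRIMORIAL := by rw [primorial_eq]; positivity

lemma tableScan_eq_B (n : Int) (hn : 2 ≤ n) : tableScan n = hasSmallFactorB n := by
  have hm2 : 2 ≤ n.toNat := by omega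
  have hncast : n = ((n.toNat : Nat) : Int) := by omega
  unfold tableScan hasSmallFactorB
  rw [gcdLoop_eq_gcd PRIMORIAL.natAbs n PRIMORIAL (le_refl _) (by omega) primorial_nonneg]
  rw [Bool.eq_iff_iff]
  simp only [List.any_eq_true, Bool.and_eq_true, Bool.not_eq_true', decide_eq_true_eq, beq_iff_eq]
  have hgcdnat : Int.gcd n PRIMORIAL = Nat.gcd n.toNat pLITn.prod := by
    unfold Int.gcd
    have h1 : n.natAbs = n.toNat := by omega
    have h2 : PRIMORIAL.natAbs = pLITn.prod := by
      rw [primorial_eq]; exact Int.natAbs_natCast _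
    rw [h1, h2]
  constructor
  · rintro ⟨p, hp, hpp, hmod⟩
    obtain ⟨q, hq, rfl⟩ := List.mem_map.mp (primes_map ▸ hp)
    have hqdvd : q ∣ n.toNat := by
      have : ((q : Nat) : Int) ∣ n := Int.dvd_of_emod_eq_zero hmod
      rw [hncast] at this
      exact_mod_cast this
    have hqq : q * q ≤ n.toNat := by
      rw [hncast] at hpp
      exact_mod_cast hpp
    have hchar := (small_factor_char n.toNat hm2).mpr ⟨q, hq, hqq, hqdvd⟩
    constructor
    · have hlt : (1 : Int) < ((Nat.gcd n.toNat pLITn.prod : Nat) : Int) := by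
        exact_mod_cast (gcd_gt_one_iff n.toNat hm2).mpr hchar.1
      rw [hgcdnat]; exact hlt
    · have hgoal : ¬ (PRIMES.contains n = true) := fun hcon =>
        hchar.2 ((contains_iff n (by omega)).mp hcon)
      simpa using hgoal
  · rintro ⟨hgt, hnc⟩
    have hg1 : 1 < Nat.gcd n.toNat pLITn.prod := by
      rw [hgcdnat] at hgt
      exact_mod_cast hgt
    have hnm : n.toNat ∉ pLITn := by
      intro hmem
      have hct : PRIMES.contains n = true := (contains_iff n (by omega)).mpr hmem
      rw [hct] at hnc
      exact Bool.noConfusion hnc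
    obtain ⟨p, hp, hpp, hpd⟩ :=
      (small_factor_char n.toNat hm2).mp ⟨(gcd_gt_one_iff n.toNat hm2).mp hg1, hnm⟩
    refine ⟨(p : Int), primes_map ▸ List.mem_map_of_mem (f := fun (q : Nat) => (q : Int)) hp, ?_, ?_⟩
    · rw [hncast]; exact_mod_cast hpp
    · apply Int.emod_eq_zero_of_dvd
      rw [hncast]
      exact_mod_cast hpd

lemma val_mono (cs : List Char) : ∀ (b v : Int), (∀ c ∈ cs, c = '0' ∨ c = '1') → 2 ≤ b → 0 ≤ v →
    v ≤ cs.foldl (fun v c => v * b + ((c.toNat : Int) - 48)) v := by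
  induction cs with
  | nil => intro b v _ _ _; simp
  | cons c cs ih =>
    intro b v hd hb hv
    have hc : c = '0' ∨ c = '1' := hd c (by simp)
    have hdig : 0 ≤ (c.toNat : Int) - 48 ∧ (c.toNat : Int) - 48 ≤ 1 := by
      rcases hc with rfl | rfl <;> simp
    have hstep : v ≤ v * b + ((c.toNat : Int) - 48) := by nlinarith
    have hnn : 0 ≤ v * b + ((c.toNat : Int) - 48) := by omega
    have := ih b (v * b + ((c.toNat : Int) - 48)) (fun x hx => hd x (List.mem_cons_of_mem _ hx)) hb hnn
    simp only [List.foldl_cons]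
    omega

lemma valB_ge_two (cs : List Char) (b : Int) (hb : 2 ≤ b)
    (hd : ∀ c ∈ cs, c = '0' ∨ c = '1') (hl : 2 ≤ cs.length) (hh : cs[0]?.getD ' ' = '1') :
    2 ≤ valB b cs := by
  match cs, hl with
  | c0 :: c1 :: t, _ =>
    have hc0 : c0 = '1' := by simpa using hh
    subst hc0
    have hc1 : c1 = '0' ∨ c1 = '1' := hd c1 (by simp)
    have hdig : 0 ≤ (c1.toNat : Int) - 48 := by rcases hc1 with rfl | rfl <;> simp
    unfold valB
    simp only [List.foldl_cons]
    have h1 : (('1'.toNat : Int) - 48) = 1 := by decide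
    have hv2 : 2 ≤ (0 * b + (('1'.toNat : Int) - 48)) * b + ((c1.toNat : Int) - 48) := by
      rw [h1]; nlinarith
    have := val_mono t b ((0 * b + (('1'.toNat : Int) - 48)) * b + ((c1.toNat : Int) - 48))
      (fun x hx => hd x (by simp [hx])) hb (by omega)
    omega

lemma all_congr_mem {α : Type} {l : List α} {p q : α → Bool}
    (h : ∀ x ∈ l, p x = q x) : l.all p = l.all q := by
  induction l with
  | nil => rfl
  | cons a l ih =>
    simp only [List.all_cons, h a (List.mem_cons_self ..),
      ih (fun x hx => h x (List.mem_cons_of_mem _ hx))]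

lemma guard_split (P1 : Prop) [Decidable P1] (b2 b3 x y : Bool)
    (hxy : ¬ P1 → b2 = true → b3 = true → x = y) :
    (if P1 then false else if !b2 then false else if !b3 then false else x) =
    (if decide P1 || !b2 || !b3 then false else y) := by
  by_cases h1 : P1
  · simp [h1]
  · cases hb2 : b2
    · simp [h1, hb2]
    · cases hb3 : b3
      · simp [h1, hb2, hb3]
      · simp [h1, hb2, hb3, hxy h1 hb2 hb3]

-- ===== VERDICT (by name: the statement is the Claim_ definition above) =====
theorem is_coin_jam_spec : Claim_equal_is_coin_jam := by
  intro coin _dom hpre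
  unfold Spec_is_coin_jam is_coin_jam is_coin_jam_alt
  apply guard_split
  intro h1 h2 h3
  have h2' : coin.toList[0]?.getD ' ' = '1' := by simpa using h2
  have h3' : coin.toList.getLast? = some '1' := by simpa using h3
  have hd : ∀ c ∈ coin.toList, c = '0' ∨ c = '1' := by
    rcases hpre with h | h | h | h
    · exact absurd h h1
    · exact absurd h2' h
    · exact absurd h3' h
    · intro c hc
      have := List.all_eq_true.mp h c hc
      simpa using this
  apply all_congr_mem
  intro base hbase
  have hb2 : 2 ≤ base := (PySem.List.mem_pyRange_one.mp hbase).1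
  have hval : 2 ≤ valB base coin.toList :=
    valB_ge_two coin.toList base hb2 hd (by omega) h2'
  have hAB : pyIntBase coin.toList base = valB base coin.toList := rfl
  rw [hAB, hnd_eq _ hval, Bool.not_not, tableScan_eq_B _ hval]
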